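-- pv_equiv track=rewrite | github.com/risilab/Autobahn | src/autobahn/decompositions.py | remove_non_maximal_paths
-- ===== SOURCE A (Python) =====
-- from typing import List
--
-- class _PathSet:
--     """Class which implements a system to check whether path super-set is contained in """
--     _paths : List[str]
--
--     def __init__(self):
--         self._paths = []
--
--     def try_update(self, path) -> bool:
--         path_str = ':'.join(str(x) for x in path)
--
--         for p in self._paths:
--             if path_str in p:
--                 return False
--
--         self._paths.append(path_str)
--         return True
--
-- def remove_non_maximal_paths(paths: List[List[int]]):
--     maximal_path_set = _PathSet()
--     maximal_paths = [[] for _ in paths]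
--
--     for i in reversed(range(len(paths))):
--         for path in paths[i]:
--             if maximal_path_set.try_update(path):
--                 maximal_paths[i].append(path)
--
--     return maximal_paths
-- ===== SOURCE B (Python) =====
-- from typing import List
--
-- def remove_non_maximal_paths(paths: List[List[int]]):
--     # Maintain the set of ALL substrings of every kept path string:
--     # "is path_str a substring of some kept string" becomes one set lookup.
--     subs = set()
--     out = []
--     for group in reversed(paths):
--         kept = []
--         for path in group:
--             s = ':'.join(str(x) for x in path)
--             if s not in subs:
--                 kept.append(path)
--                 for a in range(len(s) + 1):
--                     for b in range(a, len(s) + 1):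
--                         subs.add(s[a:b])
--         out.append(kept)
--     out.reverse()
--     return out
-- ===== Notes on version B (the rewrite author's own statement) =====
-- stated objective: alternative
-- what changed: A scans every previously kept path string per query ('path_str in p' for each kept p); B instead maintains one hash set containing every substring of every kept path string, so each query is a single set lookup, and B builds the output by appending groups in reverse order and reversing once instead of writing into a preallocated list by index.
import Mathlib
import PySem

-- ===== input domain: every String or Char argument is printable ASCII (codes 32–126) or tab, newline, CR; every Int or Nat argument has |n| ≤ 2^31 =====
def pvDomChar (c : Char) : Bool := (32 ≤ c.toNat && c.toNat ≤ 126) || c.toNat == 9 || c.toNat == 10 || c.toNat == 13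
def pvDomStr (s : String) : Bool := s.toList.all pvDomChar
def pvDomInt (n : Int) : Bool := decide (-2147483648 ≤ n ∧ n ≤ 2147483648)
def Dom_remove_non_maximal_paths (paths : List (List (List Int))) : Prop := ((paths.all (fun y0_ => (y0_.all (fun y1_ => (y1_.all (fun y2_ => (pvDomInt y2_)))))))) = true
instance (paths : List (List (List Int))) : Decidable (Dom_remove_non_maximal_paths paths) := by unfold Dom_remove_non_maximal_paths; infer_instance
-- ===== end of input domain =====

-- B replaces A's scan over all kept path strings per query by one lookup in a set
-- holding every substring of every kept string (objective: alternative).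


-- ===== PORT A =====
-- ':'.join(str(x) for x in path)  (shared by both ports; both Pythons compute it identically)
def pvPathStr (path : List Int) : String :=
  PySem.Str.join ":" (path.map PySem.Int.toStr)

-- _PathSet.try_update's loop:  for p in self._paths: if path_str in p: return False
def pvScan (ps : List String) (s : String) : Bool :=
  match ps with
  | [] => false
  | p :: rest => if PySem.Str.isIn s p then true else pvScan rest s

-- body of 'for path in paths[i]': state = (_PathSet._paths, maximal_paths)
def pvAInner (i : Nat) (st : List String × List (List (List Int))) (path : List Int) :
    List String × List (List (List Int)) :=
  let s := pvPathStr path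
  if pvScan st.1 s then st
  else (st.1 ++ [s], st.2.set i (st.2.getD i [] ++ [path]))

def pvAStep (paths : List (List (List Int))) (st : List String × List (List (List Int)))
    (i : Nat) : List String × List (List (List Int)) :=
  (paths.getD i []).foldl (pvAInner i) st

def remove_non_maximal_paths (paths : List (List (List Int))) : List (List (List Int)) :=
  -- maximal_paths = [[] for _ in paths]; for i in reversed(range(len(paths))): …
  ((List.range paths.length).reverse.foldl (pvAStep paths)
    ([], paths.map (fun _ => []))).2

-- ===== PORT B =====
-- for a in range(len(s)+1): for b in range(a, len(s)+1): subs.add(s[a:b])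
def pvAddSubs (subs : PySem.Set String) (s : String) : PySem.Set String :=
  let n := s.toList.length   -- len(s)
  (List.range (n + 1)).foldl (fun (subs : PySem.Set String) (a : Nat) =>
    (List.range' a (n + 1 - a)).foldl (fun (subs : PySem.Set String) (b : Nat) =>
      PySem.Set.add subs (PySem.Str.slice s (some (a : Int)) (some (b : Int)))) subs) subs

-- body of 'for path in group': state = (subs, kept)
def pvBInner (st : PySem.Set String × List (List Int)) (path : List Int) :
    PySem.Set String × List (List Int) :=
  let s := pvPathStr path
  if PySem.Set.contains st.1 s then st
  else (pvAddSubs st.1 s, st.2 ++ [path])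

-- body of 'for group in reversed(paths)': state = (subs, out)
def pvBStep (st : PySem.Set String × List (List (List Int))) (group : List (List Int)) :
    PySem.Set String × List (List (List Int)) :=
  let inner := group.foldl pvBInner (st.1, [])
  (inner.1, st.2 ++ [inner.2])

def remove_non_maximal_paths_alt (paths : List (List (List Int))) : List (List (List Int)) :=
  (paths.reverse.foldl pvBStep (PySem.Set.empty, [])).2.reverse

-- ===== PRECONDITION & SPEC =====
def Spec_remove_non_maximal_paths (paths : List (List (List Int))) (out : List (List (List Int))) : Prop := out = remove_non_maximal_paths_alt paths
instance (paths : List (List (List Int))) (out : List (List (List Int))) : Decidable (Spec_remove_non_maximal_paths paths out) := by unfold Spec_remove_non_maximal_paths; infer_instance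

-- ===== CLAIM (what is proved, stated in full; the proofs are below) =====
def Claim_equal_remove_non_maximal_paths : Prop := ∀ (paths : List (List (List Int))), Dom_remove_non_maximal_paths paths → Spec_remove_non_maximal_paths paths (remove_non_maximal_paths paths)

-- ===== LEMMAS AND PROOFS =====

-- Common specification skeleton: filter one group against a list of kept strings …
def pvFStep (st : List String × List (List Int)) (path : List Int) :
    List String × List (List Int) :=
  let s := pvPathStr path
  if pvScan st.1 s then st else (st.1 ++ [s], st.2 ++ [path])

def pvFilterGroup (ps : List String) (g : List (List Int)) : List String × List (List Int) :=
  g.foldl pvFStep (ps, [])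

-- … and process the groups from the right, threading the kept strings.
def pvSpec : List (List (List Int)) → List String → List String × List (List (List Int))
  | [], ps => (ps, [])
  | g :: gs, ps =>
    let r := pvSpec gs ps
    let q := pvFilterGroup r.1 g
    (q.1, q.2 :: r.2)

theorem pvScan_iff (ps : List String) (s : String) :
    pvScan ps s = true ↔ ∃ p ∈ ps, PySem.Str.isIn s p = true := by
  induction ps with
  | nil => simp [pvScan]
  | cons p rest ih =>
    simp only [pvScan, List.mem_cons]
    split_ifs with h
    · simp only [true_iff]
      exact ⟨p, Or.inl rfl, h⟩
    · rw [ih]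
      constructor
      · rintro ⟨q, hq, hin⟩
        exact ⟨q, Or.inr hq, hin⟩
      · rintro ⟨q, hq | hq, hin⟩
        · exact absurd (hq ▸ hin) h
        · exact ⟨q, hq, hin⟩

-- accumulator lemma for pvFilterGroup's fold
theorem pvF_acc (g : List (List Int)) : ∀ (ps : List String) (acc : List (List Int)),
    g.foldl pvFStep (ps, acc) =
      ((g.foldl pvFStep (ps, [])).1, acc ++ (g.foldl pvFStep (ps, [])).2) := by
  induction g with
  | nil => intro ps acc; simp
  | cons path rest ih =>
    intro ps acc
    by_cases h : pvScan ps (pvPathStr path) = true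
    · simp only [List.foldl_cons, pvFStep, h, if_pos]
      exact ih ps acc
    · simp only [List.foldl_cons, pvFStep, h, if_neg, Bool.not_eq_true, List.nil_append]
      rw [ih (ps ++ [pvPathStr path]) (acc ++ [path]),
          ih (ps ++ [pvPathStr path]) [path]]
      simp

-- unfolding pvFilterGroup on a cons, in both branches
theorem pvFG_cons_pos (ps : List String) (path : List Int) (rest : List (List Int))
    (h : pvScan ps (pvPathStr path) = true) :
    pvFilterGroup ps (path :: rest) = pvFilterGroup ps rest := by
  simp [pvFilterGroup, pvFStep, h]

theorem pvFG_cons_neg (ps : List String) (path : List Int) (rest : List (List Int))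
    (h : ¬ pvScan ps (pvPathStr path) = true) :
    pvFilterGroup ps (path :: rest) =
      ((pvFilterGroup (ps ++ [pvPathStr path]) rest).1,
        path :: (pvFilterGroup (ps ++ [pvPathStr path]) rest).2) := by
  simp only [pvFilterGroup, List.foldl_cons, pvFStep, h, if_neg, Bool.not_eq_true,
    List.nil_append]
  rw [pvF_acc rest (ps ++ [pvPathStr path]) [path]]
  simp

-- A's inner loop over one group, writing through index i
theorem pvAInner_eq (g : List (List Int)) :
    ∀ (ps : List String) (mp : List (List (List Int))) (i : Nat), i < mp.length →
    g.foldl (pvAInner i) (ps, mp) =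
      ((pvFilterGroup ps g).1, mp.set i (mp.getD i [] ++ (pvFilterGroup ps g).2)) := by
  induction g with
  | nil =>
    intro ps mp i hi
    simp [pvFilterGroup, List.getD, List.getElem?_eq_getElem hi, List.set_getElem_self]
  | cons path rest ih =>
    intro ps mp i hi
    by_cases h : pvScan ps (pvPathStr path) = true
    · simp only [List.foldl_cons, pvAInner, h, if_pos]
      rw [ih ps mp i hi, pvFG_cons_pos ps path rest h]
    · simp only [List.foldl_cons, pvAInner, h, if_neg, Bool.not_eq_true]
      rw [ih (ps ++ [pvPathStr path]) _ i (by simpa using hi),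
        pvFG_cons_neg ps path rest h]
      refine congrArg _ ?_
      rw [List.set_set]
      refine congrArg _ ?_
      simp [List.getD, List.getElem?_set_self hi]

theorem pvSpec_snoc (gs : List (List (List Int))) :
    ∀ (g : List (List Int)) (ps : List String),
    pvSpec (gs ++ [g]) ps =
      ((pvSpec gs (pvFilterGroup ps g).1).1,
        (pvSpec gs (pvFilterGroup ps g).1).2 ++ [(pvFilterGroup ps g).2]) := by
  induction gs with
  | nil => intro g ps; simp [pvSpec]
  | cons g' rest ih => intro g ps; simp [pvSpec, ih]

theorem pvAMain (paths : List (List (List Int))) : ∀ (k : Nat), k ≤ paths.length →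
    ∀ (ps : List String) (mp : List (List (List Int))), mp.length = paths.length →
    (∀ i, i < k → mp.getD i [] = ([] : List (List Int))) →
    (List.range k).reverse.foldl (pvAStep paths) (ps, mp) =
      ((pvSpec (paths.take k) ps).1, (pvSpec (paths.take k) ps).2 ++ mp.drop k) := by
  intro k
  induction k with
  | zero => intro _ ps mp _ _; simp [pvSpec]
  | succ k ih =>
    intro hk ps mp hlen hz
    have hklt : k < mp.length := by omega
    rw [List.range_succ, List.reverse_append]
    simp only [List.reverse_singleton, List.singleton_append, List.foldl_cons]
    have hAstep : pvAStep paths (ps, mp) k =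
        ((pvFilterGroup ps (paths.getD k [])).1,
          mp.set k ((pvFilterGroup ps (paths.getD k [])).2)) := by
      rw [pvAStep, pvAInner_eq _ ps mp k hklt, hz k (by omega)]
      simp
    rw [hAstep, ih (by omega) _ _ (by simpa using hlen)
        (by
          intro i hi
          have hne : k ≠ i := by omega
          have := hz i (by omega)
          simpa [List.getD, List.getElem?_set_ne hne] using this)]
    have hk' : k < paths.length := by omega
    have htake : paths.take (k + 1) = paths.take k ++ [paths.getD k []] := by
      rw [List.take_add_one]
      simp [List.getElem?_eq_getElem hk', List.getD]
    rw [htake, pvSpec_snoc]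
    refine congrArg _ ?_
    have hdrop : (mp.set k (pvFilterGroup ps (paths.getD k [])).2).drop k =
        (pvFilterGroup ps (paths.getD k [])).2 :: mp.drop (k + 1) := by
      rw [List.drop_eq_getElem_cons (by simpa using hklt)]
      rw [List.getElem_set_self (by simpa using hklt)]
      simp [List.drop_set]
    rw [hdrop]
    simp

-- ===== B side =====

-- invariant: B's set holds exactly the strings occurring inside some kept string of A
def pvInv (ps : List String) (subs : PySem.Set String) : Prop :=
  ∀ t : String, t ∈ subs ↔ ∃ p ∈ ps, PySem.Str.isIn t p = true

-- the slices s[a:b], 0 ≤ a ≤ b ≤ len(s), are exactly the substrings of s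
theorem pvSlices_iff (s t : String) (n : Nat) (hn : n = s.toList.length) :
    (∃ a, a < n + 1 ∧ ∃ b, a ≤ b ∧ b < n + 1 ∧
        t = PySem.Str.slice s (some (a : Int)) (some (b : Int))) ↔
      PySem.Str.isIn t s = true := by
  rw [PySem.Str.isIn_iff_infix]
  constructor
  · rintro ⟨a, ha, b, hab, hb, rfl⟩
    refine ⟨s.toList.take a, (s.toList.drop a).drop (b - a), ?_⟩
    rw [PySem.Str.toList_slice]
    have hs : PySem.Chars.slice s.toList (some (a : Int)) (some (b : Int)) =
        (s.toList.drop a).take (b - a) := PySem.List.slice_natCast s.toList a b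
    rw [hs, List.append_assoc, List.take_append_drop, List.take_append_drop]
  · rintro ⟨pre, post, hsplit⟩
    have hlen : pre.length + (t.toList.length + post.length) = n := by
      rw [hn, ← hsplit]
      simp
    refine ⟨pre.length, by omega, pre.length + t.toList.length, by omega, by omega, ?_⟩
    apply String.toList_inj.mp
    rw [PySem.Str.toList_slice]
    have hs2 : PySem.Chars.slice s.toList (some (pre.length : Int))
        (some ((pre.length + t.toList.length : Nat) : Int)) =
        (s.toList.drop pre.length).take (pre.length + t.toList.length - pre.length) :=
      PySem.List.slice_natCast s.toList pre.length (pre.length + t.toList.length)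
    rw [hs2]
    rw [List.append_assoc] at hsplit
    rw [← hsplit, List.drop_left]
    simp

-- membership after a fold of Set.add-like steps
theorem pvFoldl_mem (t : String) (P : Nat → Prop) (g : PySem.Set String → Nat → PySem.Set String)
    (hg : ∀ s a, t ∈ g s a ↔ t ∈ s ∨ P a) :
    ∀ (l : List Nat) (s0 : PySem.Set String),
      t ∈ l.foldl g s0 ↔ t ∈ s0 ∨ ∃ a ∈ l, P a := by
  intro l
  induction l with
  | nil => intro s0; simp
  | cons a rest ih =>
    intro s0
    rw [List.foldl_cons, ih, hg]
    simp only [List.mem_cons]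
    constructor
    · rintro ((h | h) | ⟨a', ha', hp⟩)
      · exact Or.inl h
      · exact Or.inr ⟨a, Or.inl rfl, h⟩
      · exact Or.inr ⟨a', Or.inr ha', hp⟩
    · rintro (h | ⟨a', ha | ha, hp⟩)
      · exact Or.inl (Or.inl h)
      · exact Or.inl (Or.inr (ha ▸ hp))
      · exact Or.inr ⟨a', ha, hp⟩

theorem pvAddSubs_mem (subs : PySem.Set String) (s t : String) :
    t ∈ pvAddSubs subs s ↔ t ∈ subs ∨ PySem.Str.isIn t s = true := by
  rw [pvAddSubs]
  rw [pvFoldl_mem t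
    (fun a => ∃ b ∈ List.range' a (s.toList.length + 1 - a),
      t = PySem.Str.slice s (some (a : Int)) (some (b : Int)))
    _ (fun st a => by
      rw [pvFoldl_mem t (fun b => t = PySem.Str.slice s (some (a : Int)) (some (b : Int)))
        _ (fun st' b => PySem.Set.mem_add st' _ t)])]
  rw [← pvSlices_iff s t s.toList.length rfl]
  constructor
  · rintro (h | ⟨a, ha, b, hb, rfl⟩)
    · exact Or.inl h
    · rw [List.mem_range] at ha
      rw [List.mem_range'_1] at hb
      exact Or.inr ⟨a, ha, b, hb.1, by omega, rfl⟩
  · rintro (h | ⟨a, ha, b, hab, hb, rfl⟩)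
    · exact Or.inl h
    · refine Or.inr ⟨a, List.mem_range.mpr ha, b, List.mem_range'_1.mpr ⟨hab, by omega⟩, rfl⟩

theorem pvBGroup (g : List (List Int)) :
    ∀ (ps : List String) (subs : PySem.Set String) (acc : List (List Int)), pvInv ps subs →
      (g.foldl pvBInner (subs, acc)).2 = acc ++ (pvFilterGroup ps g).2 ∧
        pvInv (pvFilterGroup ps g).1 (g.foldl pvBInner (subs, acc)).1 := by
  induction g with
  | nil => intro ps subs acc hinv; simpa [pvFilterGroup] using hinv
  | cons path rest ih =>
    intro ps subs acc hinv
    have h' : PySem.Set.contains subs (pvPathStr path) = true ↔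
        pvScan ps (pvPathStr path) = true :=
      (PySem.Set.contains_iff _ _).trans ((hinv _).trans (pvScan_iff ps _).symm)
    have hdec : PySem.Set.contains subs (pvPathStr path) = pvScan ps (pvPathStr path) := by
      cases hb : pvScan ps (pvPathStr path) <;> simp only [hb] at h' <;> simpa using h'
    by_cases h : pvScan ps (pvPathStr path) = true
    · simp only [List.foldl_cons, pvBInner, hdec, h, if_pos, pvFG_cons_pos ps path rest h]
      exact ih ps subs acc hinv
    · have hinv' : pvInv (ps ++ [pvPathStr path]) (pvAddSubs subs (pvPathStr path)) := by
        intro t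
        rw [pvAddSubs_mem, hinv t]
        simp only [List.mem_append, List.mem_singleton]
        constructor
        · rintro (⟨p, hp, hin⟩ | hin)
          · exact ⟨p, Or.inl hp, hin⟩
          · exact ⟨pvPathStr path, Or.inr rfl, hin⟩
        · rintro ⟨p, hp | hp, hin⟩
          · exact Or.inl ⟨p, hp, hin⟩
          · exact Or.inr (hp ▸ hin)
      simp only [List.foldl_cons, pvBInner, hdec, h, if_neg, Bool.not_eq_true,
        pvFG_cons_neg ps path rest h]
      obtain ⟨h1, h2⟩ := ih (ps ++ [pvPathStr path]) (pvAddSubs subs (pvPathStr path))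
        (acc ++ [path]) hinv'
      exact ⟨by rw [h1]; simp, h2⟩

theorem pvBMain (gs : List (List (List Int))) :
    ∀ (ps : List String) (subs : PySem.Set String) (out0 : List (List (List Int))),
      pvInv ps subs →
      (gs.reverse.foldl pvBStep (subs, out0)).2 = out0 ++ (pvSpec gs ps).2.reverse ∧
        pvInv (pvSpec gs ps).1 (gs.reverse.foldl pvBStep (subs, out0)).1 := by
  induction gs with
  | nil => intro ps subs out0 hinv; simpa [pvSpec] using hinv
  | cons g rest ih =>
    intro ps subs out0 hinv
    rw [List.reverse_cons, List.foldl_append]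
    obtain ⟨h1, h2⟩ := ih ps subs out0 hinv
    obtain ⟨hg1, hg2⟩ := pvBGroup g (pvSpec rest ps).1
      (rest.reverse.foldl pvBStep (subs, out0)).1 [] h2
    simp only [List.foldl_cons, List.foldl_nil, pvBStep]
    constructor
    · rw [h1, hg1]
      simp [pvSpec]
    · simpa [pvSpec] using hg2

-- ===== VERDICT (by name: the statement is the Claim_ definition above) =====
theorem remove_non_maximal_paths_spec : Claim_equal_remove_non_maximal_paths := by
  intro paths _
  unfold Spec_remove_non_maximal_paths
  have hA := pvAMain paths paths.length (le_refl _) []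
    (paths.map (fun _ => ([] : List (List Int)))) (by simp)
    (by
      intro i hi
      simp only [List.getD, List.getElem?_map]
      cases paths[i]? <;> simp)
  have hB := pvBMain paths [] PySem.Set.empty []
    (by intro t; simp [PySem.Set.empty])
  rw [remove_non_maximal_paths, remove_non_maximal_paths_alt, hA, hB.1]
  simp
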